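-- pv_equiv track=rewrite | github.com/sharmini1405/bruteforcemotifsearch | bruteforcemotifsearch.py | calculateProfile
-- ===== SOURCE A (Python) =====
-- t = 3
--
-- l = 8
--
-- def calculateProfile(myArr,pattern):
--     countMatrix = []
--
--     ii = 0
--     i=0
--     while ii < len(pattern):
--         jj = 0
--         tempCountMatrix = []
--         while jj < l:
--             tempCountMatrix.append(0)
--             jj += 1
--         countMatrix.append(tempCountMatrix)
--         ii += 1
--     while i < len(pattern):
--         j = 0
--         while j < l:
--             k = 0
--             while k < t:
--                 if pattern[i] == myArr[k][j]:
--                     countMatrix[i][j] += 1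
--                 k += 1
--             j += 1
--         i += 1
--     return countMatrix
-- ===== SOURCE B (Python) =====
-- t = 3
--
-- l = 8
--
-- def calculateProfile(myArr, pattern):
--     if not pattern:
--         return []
--     # one counter per column: char -> how many of the t rows carry it there
--     cols = []
--     for j in range(l):
--         d = {}
--         for k in range(t):
--             c = myArr[k][j]
--             d[c] = d.get(c, 0) + 1
--         cols.append(d)
--     return [[d.get(p, 0) for d in cols] for p in pattern]
-- ===== Notes on version B (the rewrite author's own statement) =====
-- stated objective: alternative
-- what changed: B precomputes one per-column character counter over the t rows and fills the matrix by dictionary lookups, replacing A's innermost rescan of the rows for every (pattern row, column) pair.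
import Mathlib
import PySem

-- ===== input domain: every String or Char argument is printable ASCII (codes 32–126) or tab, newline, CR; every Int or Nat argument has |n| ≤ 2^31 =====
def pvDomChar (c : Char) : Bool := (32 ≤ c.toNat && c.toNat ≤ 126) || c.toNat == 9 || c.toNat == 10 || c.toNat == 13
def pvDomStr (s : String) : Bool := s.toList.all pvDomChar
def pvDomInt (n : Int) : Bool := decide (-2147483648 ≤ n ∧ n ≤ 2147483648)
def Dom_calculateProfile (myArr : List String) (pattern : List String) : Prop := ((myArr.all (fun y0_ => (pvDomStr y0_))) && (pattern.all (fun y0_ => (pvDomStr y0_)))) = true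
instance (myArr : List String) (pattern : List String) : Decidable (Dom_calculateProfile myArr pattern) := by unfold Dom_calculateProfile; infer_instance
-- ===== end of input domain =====

-- B builds one per-column character counter over the t rows and fills the matrix by dictionary
-- lookups, replacing A's innermost rescan of the rows for every (row of the matrix, column) pair.

-- myArr[k][j] as the one-character string Python compares against; under Pre_ the indices are in
-- range, so the defaults are never reached and this is exact.
def pvChr (myArr : List String) (k j : Nat) : String :=
  String.ofList [((myArr.getD k "").toList.getD j ' ')]

-- ===== PORT A =====
def calculateProfile (myArr : List String) (pattern : List String) : List (List Int) :=
  -- first while-pair: build the zero matrix row by row, cell by cell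
  let countMatrix : List (List Int) :=
    (List.range pattern.length).foldl
      (fun cm _ => cm ++ [(List.range 8).foldl (fun r _ => r ++ [(0 : Int)]) []]) []
  -- second while-triple: for each i, j, scan the t rows and bump the cell on a match
  (List.range pattern.length).foldl
    (fun cm i =>
      (List.range 8).foldl
        (fun cm j =>
          (List.range 3).foldl
            (fun cm k =>
              if pattern.getD i "" = pvChr myArr k j then
                cm.modify i (fun row => row.modify j (· + 1))
              else cm)
            cm)
        cm)
    countMatrix

-- ===== PORT B =====
def calculateProfile_alt (myArr : List String) (pattern : List String) : List (List Int) :=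
  if pattern = [] then []
  else
    let cols : List (PySem.Dict String Int) :=
      (List.range 8).map (fun j =>
        (List.range 3).foldl (fun d k => d.modify (pvChr myArr k j) 0 (· + 1)) PySem.Dict.empty)
    pattern.map (fun p => cols.map (fun d => d.getD p 0))

-- ===== PRECONDITION & SPEC =====
-- Pre_ excludes exactly the inputs on which Python A raises IndexError: a nonempty pattern with
-- fewer than t = 3 rows in myArr, or one of the first 3 rows shorter than l = 8 characters.
def Pre_calculateProfile (myArr : List String) (pattern : List String) : Prop :=
  pattern = [] ∨ (3 ≤ myArr.length ∧ ∀ s ∈ myArr.take 3, 8 ≤ s.toList.length)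
instance (myArr : List String) (pattern : List String) : Decidable (Pre_calculateProfile myArr pattern) := by
  unfold Pre_calculateProfile; infer_instance

def pvWitness_calculateProfile : List String × List String :=
  (["ACGTACGT", "AAAAAAAA", "CCGGTTAA"], ["A", "C"])

def Spec_calculateProfile (myArr : List String) (pattern : List String) (out : List (List Int)) : Prop := out = calculateProfile_alt myArr pattern
instance (myArr : List String) (pattern : List String) (out : List (List Int)) : Decidable (Spec_calculateProfile myArr pattern out) := by unfold Spec_calculateProfile; infer_instance

-- ===== CLAIM (what is proved, stated in full; the proofs are below) =====
def Claim_equal_calculateProfile : Prop := ∀ (myArr : List String) (pattern : List String), Dom_calculateProfile myArr pattern → Pre_calculateProfile myArr pattern → Spec_calculateProfile myArr pattern (calculateProfile myArr pattern)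

-- ===== LEMMAS AND PROOFS =====

theorem pv_modify_comp {α : Type} (l : List α) (i : Nat) (f g : α → α) :
    (l.modify i f).modify i g = l.modify i (fun x => g (f x)) := by
  apply List.ext_getElem
  · simp [List.length_modify]
  · intro n h1 h2
    simp only [List.getElem_modify]
    split <;> simp_all

theorem pv_modify_id {α : Type} (l : List α) (i : Nat) :
    l.modify i (fun x => x) = l := by
  apply List.ext_getElem
  · simp [List.length_modify]
  · intro n h1 h2
    simp [List.getElem_modify]

theorem pv_len_foldl_modify {α : Type} (g : Nat → α → α) (js : List Nat) (r : List α) :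
    (js.foldl (fun r j => r.modify j (g j)) r).length = r.length := by
  induction js generalizing r with
  | nil => rfl
  | cons j js ih => simp [List.foldl_cons, ih, List.length_modify]

theorem pv_getElem_foldl_modify {α : Type} (g : Nat → α → α) (js : List Nat) (hnd : js.Nodup)
    (r : List α) (idx : Nat) (h : idx < r.length) :
    (js.foldl (fun r j => r.modify j (g j)) r)[idx]'(by rw [pv_len_foldl_modify]; exact h)
      = if idx ∈ js then g idx (r[idx]'h) else r[idx]'h := by
  induction js generalizing r with
  | nil => simp
  | cons j js ih =>
    simp only [List.foldl_cons]
    rcases List.nodup_cons.mp hnd with ⟨hj, hnd'⟩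
    by_cases hij : idx = j
    · subst hij
      rw [ih hnd' (r.modify idx (g idx)) (by simp [List.length_modify, h])]
      simp [hj]
    · rw [ih hnd' (r.modify j (g j)) (by simp [List.length_modify, h])]
      simp only [List.getElem_modify]
      simp [List.mem_cons, hij, Ne.symm hij]

-- the innermost k-loop adds the number of matching rows to cell (i, j)
theorem pv_inner_fold (P : Nat → Prop) [DecidablePred P] (i j : Nat) (ks : List Nat)
    (cm : List (List Int)) :
    ks.foldl
        (fun cm k => if P k then cm.modify i (fun row => row.modify j (· + 1)) else cm) cm
      = cm.modify i (fun row => row.modify j (fun x => x + (ks.countP (fun k => decide (P k)) : Int))) := by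
  induction ks generalizing cm with
  | nil =>
    simp only [List.foldl_nil, List.countP_nil, Int.natCast_zero]
    have : (fun (x : Int) => x + 0) = fun x => x := by funext x; ring
    rw [this]
    simp [pv_modify_id]
  | cons k ks ih =>
    by_cases hP : P k
    · simp only [List.foldl_cons, if_pos hP, ih, pv_modify_comp]
      congr 1
      funext row
      congr 1
      funext x
      simp only [List.countP_cons, hP, decide_true, if_pos]  -- countP of the cons
      push_cast
      ring
    · simp only [List.foldl_cons, if_neg hP, ih]
      congr 2
      simp [hP]

-- a fold of modifications of the single row i is one modification of row i
theorem pv_fold_modify_row (i : Nat) (G : Nat → List Int → List Int) (js : List Nat)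
    (cm : List (List Int)) :
    js.foldl (fun cm j => cm.modify i (G j)) cm
      = cm.modify i (fun row => js.foldl (fun row j => G j row) row) := by
  induction js generalizing cm with
  | nil => simp [pv_modify_id]
  | cons j js ih => simp [List.foldl_cons, ih, pv_modify_comp]

-- filling a zero row cell by cell yields the map of the per-cell counts
theorem pv_row_fill (n : Nat) (c : Nat → Int) :
    (List.range n).foldl (fun row j => row.modify j (fun x => x + c j)) (List.replicate n (0 : Int))
      = (List.range n).map c := by
  apply List.ext_getElem
  · simp [pv_len_foldl_modify]
  · intro idx h1 h2
    have hlen : idx < (List.replicate n (0 : Int)).length := by simpa using h2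
    rw [pv_getElem_foldl_modify (fun j => fun x => x + c j) (List.range n) (List.nodup_range)
      (List.replicate n 0) idx hlen]
    simp [List.mem_range, show idx < n by simpa using h2]

-- ===== VERDICT (by name: the statement is the Claim_ definition above) =====
set_option maxHeartbeats 1000000 in
theorem calculateProfile_spec : Claim_equal_calculateProfile := by
  intro myArr pattern _ _
  unfold Spec_calculateProfile calculateProfile calculateProfile_alt
  by_cases hp : pattern = []
  · subst hp; simp
  · rw [if_neg hp]
    -- the count of row matches for pattern entry p at column j
    set cnt : String → Nat → Int :=
      fun p j => ((List.range 3).countP (fun k => decide (p = pvChr myArr k j)) : Int) with hcnt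
    -- A's initial matrix is len(pattern) rows of 8 zeros
    have hinit :
        (List.range pattern.length).foldl
            (fun cm _ => cm ++ [(List.range 8).foldl (fun r _ => r ++ [(0 : Int)]) []]) []
          = List.replicate pattern.length (List.replicate 8 (0 : Int)) := by
      rw [PySem.List.foldl_append_singleton_eq_map]
      rw [PySem.List.foldl_append_singleton_eq_map]
      simp
    rw [hinit]
    -- collapse the three nested loops of A
    have hloop :
        (List.range pattern.length).foldl
            (fun cm i =>
              (List.range 8).foldl
                (fun cm j =>
                  (List.range 3).foldl
                    (fun cm k =>
                      if pattern.getD i "" = pvChr myArr k j then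
                        cm.modify i (fun row => row.modify j (· + 1))
                      else cm)
                    cm)
                cm)
            (List.replicate pattern.length (List.replicate 8 (0 : Int)))
          = (List.range pattern.length).foldl
              (fun cm i => cm.modify i
                (fun row => (List.range 8).foldl
                  (fun row j => row.modify j (fun x => x + cnt (pattern.getD i "") j)) row))
              (List.replicate pattern.length (List.replicate 8 (0 : Int))) := by
      apply PySem.List.foldl_congr_mem
      intro cm i _
      have h8 : ∀ cm' : List (List Int), (List.range 8).foldl
          (fun cm j =>
            (List.range 3).foldl
              (fun cm k =>
                if pattern.getD i "" = pvChr myArr k j then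
                  cm.modify i (fun row => row.modify j (· + 1))
                else cm)
              cm)
          cm'
        = (List.range 8).foldl
            (fun cm j => cm.modify i (fun row => row.modify j (fun x => x + cnt (pattern.getD i "") j))) cm' := by
        intro cm'
        apply PySem.List.foldl_congr_mem
        intro cm j _
        exact pv_inner_fold (fun k => pattern.getD i "" = pvChr myArr k j) i j (List.range 3) cm
      rw [h8, pv_fold_modify_row]
    rw [hloop]
    -- now compare the two matrices element by element
    apply List.ext_getElem
    · simp [pv_len_foldl_modify]
    · intro idx h1 h2
      have hidx : idx < pattern.length := by simpa using h2
      have hlen : idx < (List.replicate pattern.length (List.replicate 8 (0 : Int))).length := by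
        simpa using hidx
      rw [pv_getElem_foldl_modify _ (List.range pattern.length) List.nodup_range _ idx hlen]
      rw [if_pos (by simpa using hidx)]
      simp only [List.getElem_replicate]
      rw [pv_row_fill 8 (cnt (pattern.getD idx ""))]
      -- B's row for pattern[idx]
      simp only [List.getElem_map, List.map_map]
      apply List.ext_getElem
      · simp
      · intro jdx hj1 hj2
        simp only [List.getElem_map, List.getElem_range, Function.comp_apply]
        have hfold :
            (List.range 3).foldl (fun d k => d.modify (pvChr myArr k jdx) 0 (· + 1)) PySem.Dict.empty
              = PySem.Dict.counter ((List.range 3).map (fun k => pvChr myArr k jdx)) := by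
          rw [PySem.Dict.counter_eq_foldl, List.foldl_map]
        rw [hfold, PySem.Dict.getD_counter]
        have hpat : pattern.getD idx "" = pattern[idx] := List.getD_eq_getElem _ _ hidx
        rw [hcnt]
        simp only [hpat]
        congr 1
        rw [List.count_eq_countP, List.countP_map]
        apply List.countP_congr
        intro k _
        simp only [Function.comp_apply]
        rw [Bool.eq_iff_iff]
        simp only [decide_eq_true_eq, beq_iff_eq, iff_true]
        exact eq_comm
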